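-- pv_equiv track=rewrite | github.com/dorraviv8/LogTester | apps/api/app/analyzer.py | _extract_error_lines
-- ===== SOURCE A (Python) =====
-- from typing import List, Tuple, Literal
--
-- def _extract_error_lines(log_text: str, max_lines: int = 25) -> List[str]:
--     lines = [ln.rstrip() for ln in log_text.splitlines()]
--     candidates = []
--
--     keywords = ("error", "exception", "traceback", "failed", "failure", "caused by", "exit code")
--     for ln in lines:
--         low = ln.lower()
--         if any(k in low for k in keywords):
--             candidates.append(ln)
--
--     # keep order, unique
--     seen = set()
--     uniq = []
--     for ln in candidates:
--         if ln not in seen: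
--             uniq.append(ln)
--             seen.add(ln)
--
--     return uniq[:max_lines]
-- ===== SOURCE B (Python) =====
-- def _extract_error_lines(log_text: str, max_lines: int = 25):
--     keywords = ("error", "exception", "traceback", "failed", "failure", "caused by", "exit code")
--     # Build the answer back-to-front: walk the lines in reverse and, for each
--     # matching line, prepend it while removing any later duplicate of it from
--     # the partial result. No 'seen' set is needed: the first occurrence that is
--     # processed last wins the position, so order of first occurrences is kept.
--     result = []
--     for raw in reversed(log_text.splitlines()):
--         ln = raw.rstrip()
--         low = ln.lower()
--         if any(k in low for k in keywords):
--             result = [ln] + [x for x in result if x != ln]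
--     return result[:max_lines]
-- ===== Notes on version B (the rewrite author's own statement) =====
-- stated objective: alternative
-- what changed: Builds the answer back-to-front: iterates the lines in reverse and deduplicates by removing later duplicates from the partial result when prepending, eliminating A's candidate list and membership set entirely.
import Mathlib
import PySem

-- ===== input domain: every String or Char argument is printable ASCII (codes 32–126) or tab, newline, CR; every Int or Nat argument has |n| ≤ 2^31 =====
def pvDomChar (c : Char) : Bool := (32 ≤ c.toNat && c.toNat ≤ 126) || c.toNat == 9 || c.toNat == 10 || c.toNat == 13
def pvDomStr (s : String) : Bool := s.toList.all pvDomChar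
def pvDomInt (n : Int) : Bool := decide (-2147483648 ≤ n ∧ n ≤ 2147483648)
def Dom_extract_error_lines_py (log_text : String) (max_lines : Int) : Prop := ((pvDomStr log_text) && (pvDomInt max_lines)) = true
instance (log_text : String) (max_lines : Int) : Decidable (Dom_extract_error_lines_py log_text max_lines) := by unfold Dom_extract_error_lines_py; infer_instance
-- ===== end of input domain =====

-- B builds the answer back-to-front (reverse iteration, prepend and drop later duplicates
-- from the partial result) instead of A's candidate list + seen-set dedup (objective: alternative).

-- ===== PORT A =====
def pvKeywords : List String :=
  ["error", "exception", "traceback", "failed", "failure", "caused by", "exit code"]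

def extract_error_lines_py (log_text : String) (max_lines : Int) : List String :=
  let lines := (PySem.Str.splitlines log_text).map PySem.Str.rstrip
  let candidates : List String :=
    lines.foldl (fun acc ln =>
      if pvKeywords.any (fun k => PySem.Str.isIn k (PySem.Str.lower ln)) then acc ++ [ln] else acc) []
  let su : PySem.Set String × List String :=
    candidates.foldl (fun su ln =>
      if !(PySem.Set.contains su.1 ln) then (PySem.Set.add su.1 ln, su.2 ++ [ln]) else su)
      (PySem.Set.empty, [])
  PySem.List.slice su.2 none (some max_lines)

-- ===== PORT B =====
def extract_error_lines_py_alt (log_text : String) (max_lines : Int) : List String :=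
  let keywords : List String :=
    ["error", "exception", "traceback", "failed", "failure", "caused by", "exit code"]
  let result : List String :=
    (PySem.Str.splitlines log_text).reverse.foldl (fun result raw =>
      let ln := PySem.Str.rstrip raw
      let low := PySem.Str.lower ln
      if keywords.any (fun k => PySem.Str.isIn k low) then
        ln :: result.filter (fun x => x != ln)
      else result) []
  PySem.List.slice result none (some max_lines)

-- ===== PRECONDITION & SPEC =====
def Spec_extract_error_lines_py (log_text : String) (max_lines : Int) (out : List String) : Prop := out = extract_error_lines_py_alt log_text max_lines
instance (log_text : String) (max_lines : Int) (out : List String) : Decidable (Spec_extract_error_lines_py log_text max_lines out) := by unfold Spec_extract_error_lines_py; infer_instance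

-- ===== CLAIM (what is proved, stated in full; the proofs are below) =====
def Claim_equal_extract_error_lines_py : Prop := ∀ (log_text : String) (max_lines : Int), Dom_extract_error_lines_py log_text max_lines → Spec_extract_error_lines_py log_text max_lines (extract_error_lines_py log_text max_lines)

-- ===== LEMMAS AND PROOFS =====

-- the predicate both programs test on an rstripped line
def pvHit (ln : String) : Bool :=
  pvKeywords.any (fun k => PySem.Str.isIn k (PySem.Str.lower ln))

-- A's seen-set dedup, written as a recursion (first occurrences not in s)
def pvDedupFrom (s : PySem.Set String) : List String → List String
  | [] => []
  | x :: xs =>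
      if PySem.Set.contains s x then pvDedupFrom s xs
      else x :: pvDedupFrom (PySem.Set.add s x) xs

-- B's dedup: prepend and drop duplicates from the suffix result
def pvFd (xs : List String) : List String :=
  xs.foldr (fun a l => a :: l.filter (fun x => x != a)) []

theorem pv_contains_add (s : PySem.Set String) (x y : String) :
    PySem.Set.contains (PySem.Set.add s x) y = (PySem.Set.contains s y || y == x) := by
  rw [Bool.eq_iff_iff]
  simp [PySem.Set.mem_add]

theorem pvFd_cons (x : String) (xs : List String) :
    pvFd (x :: xs) = x :: (pvFd xs).filter (fun y => y != x) := rfl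

-- A's dedup fold returns acc ++ pvDedupFrom s xs
theorem pv_fold_dedup (xs : List String) (s : PySem.Set String) (acc : List String) :
    (xs.foldl (fun su ln =>
      if !(PySem.Set.contains su.1 ln) then (PySem.Set.add su.1 ln, su.2 ++ [ln]) else su)
      (s, acc)).2 = acc ++ pvDedupFrom s xs := by
  induction xs generalizing s acc with
  | nil => simp [pvDedupFrom]
  | cons x xs ih =>
    simp only [List.foldl_cons]
    by_cases h : PySem.Set.contains s x = true
    · simp only [h, Bool.not_true, Bool.false_eq_true, if_false, ih, pvDedupFrom, h, if_true]
    · rw [Bool.not_eq_true] at h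
      simp only [h, Bool.not_false, if_true, ih, pvDedupFrom, Bool.false_eq_true, if_false,
        List.append_assoc, List.singleton_append]

-- pvDedupFrom vs pvFd: interleaved seen-filtering equals filtering pvFd afterwards
theorem pv_dedupFrom_eq_filter_fd (xs : List String) (s : PySem.Set String) :
    pvDedupFrom s xs = (pvFd xs).filter (fun y => !(PySem.Set.contains s y)) := by
  induction xs generalizing s with
  | nil => simp [pvDedupFrom, pvFd]
  | cons x xs ih =>
    rw [pvFd_cons]
    by_cases h : PySem.Set.contains s x = true
    · have hm : x ∈ s := by rw [← PySem.Set.contains_iff]; exact h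
      simp only [pvDedupFrom, h, if_true, ih, List.filter_cons, Bool.not_true,
        Bool.false_eq_true, if_false, List.filter_filter]
      refine List.filter_congr ?_
      intro y _
      by_cases hy : y = x
      · subst hy; simp [hm]
      · simp [bne_iff_ne, hy]
    · rw [Bool.not_eq_true] at h
      simp only [pvDedupFrom, h, Bool.false_eq_true, if_false, ih, List.filter_cons,
        Bool.not_false, if_true, List.filter_filter]
      congr 1
      refine List.filter_congr ?_
      intro y _
      rw [pv_contains_add]
      by_cases hy : y = x
      · subst hy; simp
      · simp [bne, hy]

-- B's reversed fold equals pvFd of the filtered rstripped lines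
theorem pv_alt_fold (raws : List String) :
    List.foldl (fun (result : List String) raw =>
      if (pvKeywords.any fun k => PySem.Str.isIn k (PySem.Str.lower (PySem.Str.rstrip raw))) then
        PySem.Str.rstrip raw :: List.filter (fun x => x != PySem.Str.rstrip raw) result
      else result) [] raws.reverse
    = pvFd (((raws.map PySem.Str.rstrip).filter pvHit)) := by
  rw [List.foldl_reverse]
  show raws.foldr (fun raw result =>
      if pvHit (PySem.Str.rstrip raw) then
        PySem.Str.rstrip raw :: List.filter (fun x => x != PySem.Str.rstrip raw) result
      else result) [] = _
  induction raws with
  | nil => simp [pvFd]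
  | cons r rs ih =>
    simp only [List.foldr_cons, List.map_cons, List.filter_cons]
    by_cases h : pvHit (PySem.Str.rstrip r) = true
    · simp only [h, if_true, pvFd, List.foldr_cons, ih]
    · rw [Bool.not_eq_true] at h
      simp only [h, Bool.false_eq_true, if_false, ih]

-- ===== VERDICT (by name: the statement is the Claim_ definition above) =====
theorem extract_error_lines_py_spec : Claim_equal_extract_error_lines_py := by
  intro log_text max_lines _
  unfold Spec_extract_error_lines_py extract_error_lines_py extract_error_lines_py_alt
  simp only [PySem.List.foldl_append_if_eq_filter, List.nil_append]
  rw [show (fun ln => pvKeywords.any fun k => PySem.Str.isIn k (PySem.Str.lower ln)) = pvHit from rfl]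
  rw [pv_fold_dedup, pv_dedupFrom_eq_filter_fd]
  rw [show (["error", "exception", "traceback", "failed", "failure", "caused by", "exit code"] : List String) = pvKeywords from rfl]
  rw [pv_alt_fold]
  have hempty : ∀ y : String, PySem.Set.contains PySem.Set.empty y = false := by
    intro y
    rw [← Bool.not_eq_true, PySem.Set.contains_iff]
    simp [PySem.Set.empty]
  simp [hempty]
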